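-- pv_equiv track=rewrite | github.com/YonaraMirelly/Estudos-Python | Estudos_Rodrigo/1va/arquivos.py | calcular_pastas
-- ===== SOURCE A (Python) =====
-- def ordenar_selecao(lista):
--     """ Ordena a lista arr usando o algoritmo de ordenação por seleção. """
--     n = len(lista)
--     for i in range(n):
--         # encontrar o menor elemento na parte não ordenada
--         indice_menor = i
--         for j in range(i + 1, n):
--             if lista[j] < lista[indice_menor]:
--                 indice_menor = j
--         # trocar o menor elemento encontrado com o primeiro elemento não ordenado
--         lista[i], lista[indice_menor] = lista[indice_menor], lista[i]
--
-- def calcular_pastas(tamanhos, B):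
--     ordenar_selecao(tamanhos)  # ordenar os tamanhos dos arquivos usando Ordenação por Seleção
--     i = 0  # menor arquivo: ponteiro
--     j = len(tamanhos) - 1  # maior arquivo: ponteiro
--     pastas = 0
--
--     while i <= j:
--         if tamanhos[i] + tamanhos[j] <= B:
--             i += 1  # usa o menor arquivo
--         # o maior arquivo é sempre usado aqui
--         j -= 1
--         pastas += 1  # atualizar a pasta
--
--     return pastas
-- ===== SOURCE B (Python) =====
-- def calcular_pastas(tamanhos, B):
--     # Different algorithm: partition by value (2*x <= B = "small") instead of a
--     # two-pointer pass. Two smalls always fit together, two larges never do, so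
--     # the answer is n - m - (len(smalls) - m)//2 where m is the maximum number
--     # of small/large pairs; m is found by binary search on the monotone block
--     # condition smalls[i] + larges[k-1-i] <= B. Does not mutate `tamanhos`
--     # (the original sorts it in place); the return value is identical.
--     n = len(tamanhos)
--     smalls = sorted(x for x in tamanhos if 2 * x <= B)
--     larges = sorted(x for x in tamanhos if 2 * x > B)
--
--     def ok(k):
--         return all(smalls[i] + larges[k - 1 - i] <= B for i in range(k))
--
--     lo, hi = 0, min(len(smalls), len(larges))
--     while lo < hi:
--         mid = (lo + hi + 1) // 2
--         if ok(mid):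
--             lo = mid
--         else:
--             hi = mid - 1
--     return n - lo - (len(smalls) - lo) // 2
-- ===== Notes on version B (the rewrite author's own statement) =====
-- stated objective: faster
-- what changed: B replaces A's selection-sort + two-pointer greedy by a value partition (small = 2*x <= B, large = 2*x > B): two smalls always share a folder, two larges never do, so the answer is n - m - (|smalls|-m)//2 where m, the maximum number of small/large pairs, is found by binary search on the monotone block condition smalls[i]+larges[k-1-i] <= B; note A sorts the input list in place while B leaves it unchanged (the proved equivalence is about the return value).
import Mathlib
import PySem

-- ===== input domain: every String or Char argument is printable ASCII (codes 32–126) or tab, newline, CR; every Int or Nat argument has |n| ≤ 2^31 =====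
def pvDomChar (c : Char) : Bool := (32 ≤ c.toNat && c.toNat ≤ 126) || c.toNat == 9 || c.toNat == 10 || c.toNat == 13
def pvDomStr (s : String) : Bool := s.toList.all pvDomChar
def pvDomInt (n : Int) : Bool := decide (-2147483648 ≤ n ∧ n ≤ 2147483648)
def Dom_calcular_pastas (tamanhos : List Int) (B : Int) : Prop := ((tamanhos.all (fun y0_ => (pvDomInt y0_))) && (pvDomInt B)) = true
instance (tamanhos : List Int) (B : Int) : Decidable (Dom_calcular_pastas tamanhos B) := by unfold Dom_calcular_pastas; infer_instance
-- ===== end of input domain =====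

-- B replaces A's selection sort + two-pointer greedy by a value partition (smalls: 2x ≤ B,
-- larges: 2x > B) and a binary search for the maximal small/large matching; A sorts its
-- argument in place (B does not): the equivalence proved here is about the RETURN value only.


-- ===== PORT A =====
-- inner loop of ordenar_selecao: 'for j in range(i+1, n): if lista[j] < lista[indice_menor]: indice_menor = j'
def pvSelMin (l : List Int) (js : List Nat) (im : Nat) : Nat :=
  js.foldl (fun im j => if l.getD j 0 < l.getD im 0 then j else im) im

-- one outer iteration: find the minimum of the unsorted suffix and swap it into slot i
-- (Python's simultaneous assignment: both right-hand sides read the OLD list)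
def pvSelStep (n : Nat) (l : List Int) (i : Nat) : List Int :=
  let im := pvSelMin l (List.range' (i + 1) (n - (i + 1))) i
  let a := l.getD i 0
  let b := l.getD im 0
  (l.set i b).set im a

-- ordenar_selecao(lista): n = len(lista); for i in range(n): …  (returns the mutated list)
def ordenarSelecao (l : List Int) : List Int :=
  (List.range l.length).foldl (pvSelStep l.length) l

-- the while-loop of A: 'while i <= j: if t[i]+t[j] <= B: i += 1; j -= 1; pastas += 1'
def pvLoopA (s : List Int) (B : Int) (i j pastas : Int) : Int :=
  if i ≤ j then
    if s.getD i.toNat 0 + s.getD j.toNat 0 ≤ B then pvLoopA s B (i + 1) (j - 1) (pastas + 1)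
    else pvLoopA s B i (j - 1) (pastas + 1)
  else pastas
termination_by (j + 1 - i).toNat
decreasing_by all_goals omega

def calcular_pastas (tamanhos : List Int) (B : Int) : Int :=
  let t := ordenarSelecao tamanhos
  pvLoopA t B 0 ((t.length : Int) - 1) 0

-- ===== PORT B =====
-- ok(k): 'all(smalls[i] + larges[k-1-i] <= B for i in range(k))' (only called with k ≤ min length, so indexing is exact)
def pvOk (smalls larges : List Int) (B : Int) (k : Nat) : Bool :=
  (List.range k).all (fun i => decide (smalls.getD i 0 + larges.getD (k - 1 - i) 0 ≤ B))

-- 'while lo < hi: mid = (lo+hi+1)//2; if ok(mid): lo = mid else: hi = mid - 1'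
def pvBS (smalls larges : List Int) (B : Int) (lo hi : Nat) : Nat :=
  if lo < hi then
    let mid := (lo + hi + 1) / 2
    if pvOk smalls larges B mid then pvBS smalls larges B mid hi
    else pvBS smalls larges B lo (mid - 1)
  else lo
termination_by hi - lo
decreasing_by all_goals omega

def calcular_pastas_alt (tamanhos : List Int) (B : Int) : Int :=
  let smalls := PySem.List.sorted (tamanhos.filter (fun x => 2 * x ≤ B)) (fun x => x)
  let larges := PySem.List.sorted (tamanhos.filter (fun x => B < 2 * x)) (fun x => x)
  let m := pvBS smalls larges B 0 (min smalls.length larges.length)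
  (tamanhos.length : Int) - (m : Int) - (((smalls.length : Int) - (m : Int)) / 2)

-- ===== PRECONDITION & SPEC =====
def Spec_calcular_pastas (tamanhos : List Int) (B : Int) (out : Int) : Prop := out = calcular_pastas_alt tamanhos B
instance (tamanhos : List Int) (B : Int) (out : Int) : Decidable (Spec_calcular_pastas tamanhos B out) := by unfold Spec_calcular_pastas; infer_instance

-- ===== CLAIM (what is proved, stated in full; the proofs are below) =====
def Claim_equal_calcular_pastas : Prop := ∀ (tamanhos : List Int) (B : Int), Dom_calcular_pastas tamanhos B → Spec_calcular_pastas tamanhos B (calcular_pastas tamanhos B)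

-- ===== LEMMAS AND PROOFS =====

-- ---------- A side: selection sort computes Python's sorted() ----------

-- pvSelMin returns its start index or an index from js, and selects a minimum value
theorem pvSelMin_spec (l : List Int) (js : List Nat) (im : Nat) :
    (pvSelMin l js im = im ∨ pvSelMin l js im ∈ js) ∧
    l.getD (pvSelMin l js im) 0 ≤ l.getD im 0 ∧
    (∀ j ∈ js, l.getD (pvSelMin l js im) 0 ≤ l.getD j 0) := by
  induction js generalizing im with
  | nil => exact ⟨Or.inl rfl, le_refl _, by simp⟩
  | cons j js ih =>
    have hrec : pvSelMin l (j :: js) im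
        = pvSelMin l js (if l.getD j 0 < l.getD im 0 then j else im) := rfl
    by_cases h : l.getD j 0 < l.getD im 0
    · rw [hrec, if_pos h]
      obtain ⟨h1, h2, h3⟩ := ih j
      refine ⟨Or.inr ?_, by omega, ?_⟩
      · rcases h1 with h1 | h1
        · rw [h1]; exact List.mem_cons_self
        · exact List.mem_cons_of_mem j h1
      · intro k hk
        rcases List.mem_cons.mp hk with rfl | hk
        · exact h2
        · exact h3 k hk
    · rw [hrec, if_neg h]
      obtain ⟨h1, h2, h3⟩ := ih im
      refine ⟨?_, h2, ?_⟩
      · rcases h1 with h1 | h1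
        · exact Or.inl h1
        · exact Or.inr (List.mem_cons_of_mem j h1)
      · intro k hk
        rcases List.mem_cons.mp hk with rfl | hk
        · omega
        · exact h3 k hk

-- swapping two in-range entries is a permutation
theorem swap_perm (l : List Int) (i im : Nat) (hi : i < l.length) (him : im < l.length) :
    ((l.set i (l.getD im 0)).set im (l.getD i 0)).Perm l := by
  rw [List.perm_iff_count]
  intro x
  have him' : im < (l.set i (l.getD im 0)).length := by simpa using him
  rw [List.count_set him', List.count_set hi]
  have hgi : l.getD i 0 = l[i] := List.getD_eq_getElem l 0 hi
  have hgim : l.getD im 0 = l[im] := List.getD_eq_getElem l 0 him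
  have hset : (l.set i (l.getD im 0))[im] = if i = im then l.getD im 0 else l[im] :=
    List.getElem_set him'
  have hcnt_i : l[i] = x → 0 < l.count x := fun h => by
    rw [← h]; exact List.count_pos_iff.mpr (l.getElem_mem hi)
  have hcnt_im : l[im] = x → 0 < l.count x := fun h => by
    rw [← h]; exact List.count_pos_iff.mpr (l.getElem_mem him)
  rw [hset, hgi, hgim]
  simp only [ite_self, beq_iff_eq]
  split_ifs <;>
    (try have := hcnt_i (by assumption)) <;>
    (try have := hcnt_im (by assumption)) <;>
    omega

-- the sortedness invariant: every slot below i is ≤ every later slot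
def SelInv (l : List Int) (i : Nat) : Prop :=
  ∀ p q, p < i → p < q → q < l.length → l.getD p 0 ≤ l.getD q 0

-- one selection step preserves length and permutation and extends the invariant
theorem pvSelStep_spec (l : List Int) (i : Nat) (hi : i < l.length) (hinv : SelInv l i) :
    (pvSelStep l.length l i).length = l.length ∧
    (pvSelStep l.length l i).Perm l ∧
    SelInv (pvSelStep l.length l i) (i + 1) := by
  obtain ⟨hmem, hle_i, hle_js⟩ := pvSelMin_spec l (List.range' (i + 1) (l.length - (i + 1))) i
  set im := pvSelMin l (List.range' (i + 1) (l.length - (i + 1))) i with him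
  have him_ge : i ≤ im := by
    rcases hmem with h | h
    · omega
    · have := List.mem_range'_1.mp h; omega
  have him_lt : im < l.length := by
    rcases hmem with h | h
    · omega
    · have := List.mem_range'_1.mp h; omega
  have hmin : ∀ j, i ≤ j → j < l.length → l.getD im 0 ≤ l.getD j 0 := by
    intro j h1 h2
    rcases Nat.eq_or_lt_of_le h1 with rfl | h1
    · exact hle_i
    · exact hle_js j (List.mem_range'_1.mpr ⟨h1, by omega⟩)
  have hstep : pvSelStep l.length l i = (l.set i (l.getD im 0)).set im (l.getD i 0) := rfl
  have hlen : (pvSelStep l.length l i).length = l.length := by rw [hstep]; simp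
  have hval : ∀ r, r < l.length → (pvSelStep l.length l i).getD r 0
      = if im = r then l.getD i 0 else if i = r then l.getD im 0 else l.getD r 0 := by
    intro r hr
    rw [List.getD_eq_getElem _ _ (by omega : r < (pvSelStep l.length l i).length)]
    rw [List.getD_eq_getElem l 0 hr]
    simp only [hstep, List.getElem_set]
  refine ⟨hlen, ?_, ?_⟩
  · rw [hstep]; exact swap_perm l i im hi him_lt
  · intro p q hp hpq hq
    rw [hlen] at hq
    rw [hval p (by omega), hval q hq]
    by_cases hpi : p < i
    · rw [if_neg (by omega : ¬ im = p), if_neg (by omega : ¬ i = p)]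
      split_ifs with h3 h4
      · exact hinv p i hpi (by omega) hi
      · exact hinv p im hpi (by omega) him_lt
      · exact hinv p q hpi hpq hq
    · have hpieq : p = i := by omega
      subst hpieq
      have hlhs : (if im = p then l.getD p 0 else if p = p then l.getD im 0 else l.getD p 0)
          = l.getD im 0 := by
        by_cases h1 : im = p
        · rw [if_pos h1, h1]
        · rw [if_neg h1, if_pos rfl]
      rw [hlhs]
      split_ifs with h3 h4
      · exact hmin p (le_refl _) (by omega)
      · omega
      · exact hmin q (by omega) hq

-- folding selection steps over range' [i, n) yields a sorted permutation
theorem selFold_spec (l0 : List Int) (k : Nat) :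
    ∀ (i : Nat) (l : List Int), i + k = l0.length → l.length = l0.length → l.Perm l0 →
      SelInv l i →
      ((List.range' i k).foldl (pvSelStep l0.length) l).Perm l0 ∧
      SelInv ((List.range' i k).foldl (pvSelStep l0.length) l) l0.length ∧
      ((List.range' i k).foldl (pvSelStep l0.length) l).length = l0.length := by
  induction k with
  | zero =>
    intro i l hik hlen hperm hinv
    simp only [List.range'_zero, List.foldl_nil]
    exact ⟨hperm, by simpa [← hik] using hinv, hlen⟩
  | succ k ih =>
    intro i l hik hlen hperm hinv
    have hi : i < l.length := by omega
    obtain ⟨h1, h2, h3⟩ := pvSelStep_spec l i hi hinv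
    have hlen' : l0.length = l.length := hlen.symm
    rw [List.range'_succ, List.foldl_cons]
    have heq : pvSelStep l0.length l i = pvSelStep l.length l i := by rw [hlen]
    rw [heq]
    exact ih (i + 1) _ (by omega) (by omega) (h2.trans hperm) h3

-- ordenar_selecao computes exactly Python's sorted()
theorem ordenarSelecao_eq_sorted (l : List Int) :
    ordenarSelecao l = PySem.List.sorted l (fun x => x) := by
  have h0 : SelInv l 0 := fun p q hp => by omega
  obtain ⟨hperm, hinv, hlen⟩ :=
    selFold_spec l l.length 0 l (by omega) rfl (List.Perm.refl l) h0
  rw [ordenarSelecao, List.range_eq_range']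
  refine (PySem.List.sorted_id_eq_of_perm_of_pairwise l _ hperm ?_).symm
  rw [List.pairwise_iff_getElem]
  intro p q hp hq hpq
  have := hinv p q (by omega) hpq hq
  rwa [List.getD_eq_getElem _ 0 (by omega), List.getD_eq_getElem _ 0 hq] at this

-- ---------- shared machinery ----------

-- getD is monotone on a sorted list (within range)
theorem getD_mono_of_pairwise (l : List Int) (h : l.Pairwise (· ≤ ·)) (p q : Nat)
    (hpq : p ≤ q) (hq : q < l.length) : l.getD p 0 ≤ l.getD q 0 := by
  rw [List.getD_eq_getElem l 0 (by omega), List.getD_eq_getElem l 0 hq]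
  rcases Nat.eq_or_lt_of_le hpq with rfl | hlt
  · exact le_refl _
  · exact (List.pairwise_iff_getElem.mp h) p q (by omega) hq hlt

-- sorted(t) splits as sorted(smalls) ++ sorted(larges)
theorem sorted_split (t : List Int) (B : Int) :
    PySem.List.sorted t (fun x => x)
      = PySem.List.sorted (t.filter (fun x => 2 * x ≤ B)) (fun x => x)
        ++ PySem.List.sorted (t.filter (fun x => B < 2 * x)) (fun x => x) := by
  have hfc : t.filter (fun x => B < 2 * x)
      = t.filter (fun x => !(decide (2 * x ≤ B))) :=
    List.filter_congr (fun x _ => by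
      show decide (B < 2 * x) = !(decide (2 * x ≤ B))
      rw [← decide_not]; simp [not_le])
  have hperm : (PySem.List.sorted (t.filter (fun x => 2 * x ≤ B)) (fun x => x)
      ++ PySem.List.sorted (t.filter (fun x => B < 2 * x)) (fun x => x)).Perm t := by
    refine ((PySem.List.sorted_perm _ _ _).append (PySem.List.sorted_perm _ _ _)).trans ?_
    rw [hfc]
    exact List.filter_append_perm _ t
  refine PySem.List.sorted_id_eq_of_perm_of_pairwise t _ hperm ?_
  rw [List.pairwise_append]
  refine ⟨PySem.List.sorted_pairwise _ _, PySem.List.sorted_pairwise _ _, ?_⟩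
  intro x hx y hy
  rw [PySem.List.mem_sorted, List.mem_filter] at hx hy
  have h1 : 2 * x ≤ B := by simpa using hx.2
  have h2 : B < 2 * y := by simpa using hy.2
  omega


-- ---------- A's loop, characterized via the greedy matching ----------

-- the greedy matching A's loop performs: larges descending against smalls ascending
def pvGreedy (B : Int) : List Int → List Int → Nat
  | _, [] => 0
  | [], _ :: _ => 0
  | s :: S', l :: L' => if s + l ≤ B then 1 + pvGreedy B S' L' else pvGreedy B (s :: S') L'

-- pvOk as a proposition
def OkP (S L : List Int) (B : Int) (k : Nat) : Prop :=
  ∀ i, i < k → S.getD i 0 + L.getD (k - 1 - i) 0 ≤ B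

theorem pvOk_iff (S L : List Int) (B : Int) (k : Nat) :
    pvOk S L B k = true ↔ OkP S L B k := by
  simp [pvOk, OkP, List.all_eq_true, List.mem_range]



-- phase 2 of A's loop: the window is entirely inside the smalls
theorem phase2 (u : List Int) (B : Int) (a : Nat)
    (hmono : u.Pairwise (· ≤ ·))
    (hsmall : ∀ idx : Nat, idx < a → 2 * u.getD idx 0 ≤ B)
    (ha : a ≤ u.length) :
    ∀ (c : Nat) (i j p : Int), 0 ≤ i → i + c = j + 1 → j < (a : Int) →
      pvLoopA u B i j p = p + (c : Int) - ((c / 2 : Nat) : Int) := by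
  intro c
  induction c using Nat.strong_induction_on with
  | _ c ih =>
    intro i j p hi hc hj
    match c, hc with
    | 0, hc =>
      rw [pvLoopA]
      rw [if_neg (by omega)]
      simp
    | 1, hc =>
      have hij : i = j := by omega
      subst hij
      have hjn : i.toNat < a := by omega
      have hsum : u.getD i.toNat 0 + u.getD i.toNat 0 ≤ B := by
        have := hsmall i.toNat hjn
        omega
      rw [pvLoopA, if_pos (by omega), if_pos hsum, pvLoopA, if_neg (by omega)]
      norm_num
    | (c + 2), hc =>
      have hij : i < j := by omega
      have hjn : j.toNat < a := by omega
      have hle : u.getD i.toNat 0 ≤ u.getD j.toNat 0 :=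
        getD_mono_of_pairwise u hmono i.toNat j.toNat (by omega) (by omega)
      have hsum : u.getD i.toNat 0 + u.getD j.toNat 0 ≤ B := by
        have := hsmall j.toNat hjn
        omega
      rw [pvLoopA, if_pos (by omega), if_pos hsum]
      rw [ih c (by omega) (i + 1) (j - 1) (p + 1) (by omega) (by omega) (by omega)]
      have : ((c + 2) / 2 : Nat) = (c / 2 : Nat) + 1 := by omega
      rw [this]
      push_cast
      ring


-- phase 1 of A's loop: j points into the larges; it performs the greedy matching
theorem pvGreedy_nil_right (B : Int) (S : List Int) : pvGreedy B S [] = 0 := by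
  cases S <;> simp [pvGreedy]

theorem pvGreedy_nil_left (B : Int) (L : List Int) : pvGreedy B [] L = 0 := by
  cases L <;> simp [pvGreedy]

theorem pvGreedy_cons (B x y : Int) (X Y : List Int) :
    pvGreedy B (x :: X) (y :: Y)
      = if x + y ≤ B then 1 + pvGreedy B X Y else pvGreedy B (x :: X) Y := rfl

theorem phase1 (S L : List Int) (B : Int)
    (hS : S.Pairwise (· ≤ ·)) (hL : L.Pairwise (· ≤ ·))
    (hsmall : ∀ x ∈ S, 2 * x ≤ B) (hlarge : ∀ x ∈ L, B < 2 * x) :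
    ∀ (k : Nat), k ≤ L.length → ∀ (i : Nat), i ≤ S.length → ∀ (p : Int),
      pvLoopA (S ++ L) B (i : Int) ((S.length : Int) + (k : Int) - 1) p
        = p + (k : Int)
          + ((S.length - i - pvGreedy B (S.drop i) ((L.take k).reverse) : Nat) : Int)
          - (((S.length - i - pvGreedy B (S.drop i) ((L.take k).reverse)) / 2 : Nat) : Int) := by
  have hu : (S ++ L).Pairwise (· ≤ ·) := by
    rw [List.pairwise_append]
    refine ⟨hS, hL, fun x hx y hy => ?_⟩
    have := hsmall x hx
    have := hlarge y hy
    omega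
  have hgetSm : ∀ q : Nat, q < S.length → (S ++ L).getD q 0 = S.getD q 0 := by
    intro q hq
    rw [List.getD_append _ _ _ _ hq]
  have hgetR : ∀ q : Nat, q < L.length → (S ++ L).getD (S.length + q) 0 = L.getD q 0 := by
    intro q hq
    have h := List.getElem?_append_right (l₁ := S) (l₂ := L) (i := S.length + q) (by omega)
    simp [List.getD, h]
  have husmall : ∀ idx : Nat, idx < S.length → 2 * (S ++ L).getD idx 0 ≤ B := by
    intro idx hidx
    rw [hgetSm idx hidx, List.getD_eq_getElem S 0 hidx]
    exact hsmall _ (S.getElem_mem hidx)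
  intro k
  induction k with
  | zero =>
    intro hk i hi p
    have h2 := phase2 (S ++ L) B S.length hu husmall (by simp)
      (S.length - i) (i : Int) ((S.length : Int) + (0 : Nat) - 1) p (by omega)
      (by push_cast; omega) (by push_cast; omega)
    rw [h2]
    simp [pvGreedy_nil_right]
  | succ k ih =>
    intro hk i hi p
    have hkL : k < L.length := by omega
    have hLk : L.getD k 0 ∈ L := by
      rw [List.getD_eq_getElem L 0 hkL]; exact L.getElem_mem hkL
    have hjget : (S ++ L).getD ((S.length : Int) + ((k+1 : Nat) : Int) - 1).toNat 0 = L.getD k 0 := by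
      have : ((S.length : Int) + ((k+1 : Nat) : Int) - 1).toNat = S.length + k := by
        push_cast; omega
      rw [this, hgetR k hkL]
    have htake : (L.take (k + 1)).reverse = L.getD k 0 :: (L.take k).reverse := by
      rw [List.take_add_one, List.getElem?_eq_getElem hkL, List.getD_eq_getElem L 0 hkL]
      simp
    have hij : (i : Int) ≤ (S.length : Int) + ((k+1 : Nat) : Int) - 1 := by push_cast; omega
    by_cases hia : i < S.length
    · have hdrop : S.drop i = S.getD i 0 :: S.drop (i + 1) := by
        rw [List.getD_eq_getElem S 0 hia]
        exact List.drop_eq_getElem_cons hia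
      have higet : (S ++ L).getD ((i : Int)).toNat 0 = S.getD i 0 := by
        simp only [Int.toNat_natCast]
        exact hgetSm i hia
      by_cases hcond : S.getD i 0 + L.getD k 0 ≤ B
      · -- pair branch
        rw [pvLoopA, if_pos hij, higet, hjget, if_pos hcond]
        have e1 : ((i : Int) + 1) = ((i + 1 : Nat) : Int) := by push_cast; ring
        have e2 : ((S.length : Int) + ((k+1 : Nat) : Int) - 1 - 1)
            = (S.length : Int) + (k : Int) - 1 := by push_cast; ring
        rw [e1, e2, ih (by omega) (i + 1) (by omega) (p + 1)]
        have hg : pvGreedy B (S.drop i) ((L.take (k + 1)).reverse)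
            = 1 + pvGreedy B (S.drop (i + 1)) ((L.take k).reverse) := by
          rw [hdrop, htake, pvGreedy_cons, if_pos hcond]
        rw [hg]
        rw [show S.length - i - (1 + pvGreedy B (S.drop (i+1)) ((L.take k).reverse))
            = S.length - (i + 1) - pvGreedy B (S.drop (i+1)) ((L.take k).reverse) by omega]
        push_cast
        ring
      · -- largest alone
        rw [pvLoopA, if_pos hij, higet, hjget, if_neg hcond]
        have e2 : ((S.length : Int) + ((k+1 : Nat) : Int) - 1 - 1)
            = (S.length : Int) + (k : Int) - 1 := by push_cast; ring
        rw [e2, ih (by omega) i (by omega) (p + 1)]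
        have hg : pvGreedy B (S.drop i) ((L.take (k + 1)).reverse)
            = pvGreedy B (S.drop i) ((L.take k).reverse) := by
          rw [hdrop, htake, pvGreedy_cons, if_neg hcond, ← hdrop]
        rw [hg]
        push_cast
        ring
    · -- i = S.length: both pointers inside the larges, never a pair
      have hieq : i = S.length := by omega
      have h0L : 0 < L.length := by omega
      have higet : (S ++ L).getD ((i : Int)).toNat 0 = L.getD 0 0 := by
        simp only [Int.toNat_natCast, hieq]
        have := hgetR 0 h0L
        simpa using this
      have hL0 : L.getD 0 0 ∈ L := by
        rw [List.getD_eq_getElem L 0 h0L]; exact L.getElem_mem h0L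
      have hcond : ¬ ((S ++ L).getD ((i : Int)).toNat 0
          + (S ++ L).getD ((S.length : Int) + ((k+1 : Nat) : Int) - 1).toNat 0 ≤ B) := by
        rw [higet, hjget]
        have := hlarge _ hL0
        have := hlarge _ hLk
        omega
      rw [pvLoopA, if_pos hij, if_neg hcond]
      have e2 : ((S.length : Int) + ((k+1 : Nat) : Int) - 1 - 1)
          = (S.length : Int) + (k : Int) - 1 := by push_cast; ring
      rw [e2, ih (by omega) i (by omega) (p + 1)]
      have hdropnil : S.drop i = [] := by
        rw [hieq]; simp
      rw [hdropnil, pvGreedy_nil_left, pvGreedy_nil_left]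
      push_cast
      ring


-- ---------- B side: the binary search finds exactly the greedy matching size ----------

theorem okP_mono (S L : List Int) (B : Int) (hL : L.Pairwise (· ≤ ·)) :
    ∀ j k, j ≤ k → k ≤ L.length → OkP S L B k → OkP S L B j := by
  intro j k hjk hk hok i hi
  have h1 := hok i (by omega)
  have h2 : L.getD (j - 1 - i) 0 ≤ L.getD (k - 1 - i) 0 :=
    getD_mono_of_pairwise L hL _ _ (by omega) (by omega)
  omega


-- the greedy matching size is feasible and maximal
theorem gre_spec (B : Int) : ∀ (L S : List Int), S.Pairwise (· ≤ ·) → L.Pairwise (· ≤ ·) →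
    pvGreedy B S L.reverse ≤ min S.length L.length ∧
    OkP S L B (pvGreedy B S L.reverse) ∧
    (pvGreedy B S L.reverse = min S.length L.length ∨
      ¬ OkP S L B (pvGreedy B S L.reverse + 1)) := by
  intro L
  induction L using List.reverseRecOn with
  | nil =>
    intro S _ _
    have hz : pvGreedy B S [].reverse = 0 := by cases S <;> simp [pvGreedy]
    rw [hz]
    exact ⟨by simp, fun i hi => by omega, Or.inl (by simp)⟩
  | append_singleton L' l ih =>
    intro S hS hL
    have hL' : L'.Pairwise (· ≤ ·) := (List.pairwise_append.mp hL).1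
    have hrev : (L' ++ [l]).reverse = l :: L'.reverse := by simp
    have hlenL : (L' ++ [l]).length = L'.length + 1 := by simp
    have hgetL : ∀ q : Nat, q < L'.length → (L' ++ [l]).getD q 0 = L'.getD q 0 := by
      intro q hq
      rw [List.getD_append _ _ _ _ hq]
    have hgetl : (L' ++ [l]).getD L'.length 0 = l := by
      rw [List.getD_eq_getElem _ 0 (by simp)]
      simp
    cases S with
    | nil =>
      rw [hrev]
      refine ⟨by simp [pvGreedy], fun i hi => by simp [pvGreedy] at hi, Or.inl ?_⟩
      simp [pvGreedy]
    | cons s S' =>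
      have hS' : S'.Pairwise (· ≤ ·) := (List.pairwise_cons.mp hS).2
      by_cases hc : s + l ≤ B
      · obtain ⟨ih1, ih2, ih3⟩ := ih S' hS' hL'
        generalize hg' : pvGreedy B S' L'.reverse = g' at ih1 ih2 ih3
        have hval : pvGreedy B (s :: S') (L' ++ [l]).reverse = 1 + g' := by
          rw [hrev]; simp [pvGreedy, if_pos hc, hg']
        rw [hval]
        refine ⟨by simp at ih1 ⊢; omega, ?_, ?_⟩
        · -- OkP (s::S') (L'++[l]) (1 + g')
          intro i hi
          cases i with
          | zero =>
            have hq : 1 + g' - 1 - 0 = g' := by omega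
            have hle : (L' ++ [l]).getD g' 0 ≤ l := by
              have := getD_mono_of_pairwise _ hL g' L'.length (by omega) (by simp)
              rwa [hgetl] at this
            simp only [List.getD_cons_zero, hq]
            omega
          | succ i' =>
            have hi' : i' < g' := by omega
            have h2 := ih2 i' hi'
            have hidx : 1 + g' - 1 - (i' + 1) = g' - 1 - i' := by omega
            have hrange : g' - 1 - i' < L'.length := by omega
            simp only [List.getD_cons_succ, hidx, hgetL _ hrange]
            exact h2
        · -- maximality
          by_cases hcap : g' = L'.length ∨ g' = S'.length
          · left
            simp only [List.length_cons, hlenL]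
            simp only [le_min_iff] at ih1
            omega
          · push Not at hcap
            simp only [le_min_iff] at ih1
            have hlt : g' < L'.length ∧ g' < S'.length := by omega
            rcases ih3 with h | h
            · exfalso; omega
            · right
              intro hok
              apply h
              intro i hi
              have := hok (i + 1) (by omega)
              simp only [List.getD_cons_succ] at this
              rwa [show 1 + g' + 1 - 1 - (i + 1) = g' + 1 - 1 - i by omega,
                hgetL _ (by omega)] at this
      · obtain ⟨ih1, ih2, ih3⟩ := ih (s :: S') hS hL'
        generalize hh : pvGreedy B (s :: S') L'.reverse = h at ih1 ih2 ih3
        have hval : pvGreedy B (s :: S') (L' ++ [l]).reverse = h := by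
          rw [hrev]; simp [pvGreedy, if_neg hc, hh]
        rw [hval]
        have hhL : h ≤ L'.length := by simp at ih1; omega
        have hokh : OkP (s :: S') (L' ++ [l]) B h := by
          intro i hi
          have := ih2 i hi
          rwa [hgetL _ (by omega)]
        refine ⟨by simp at ih1 ⊢; omega, hokh, ?_⟩
        by_cases hcap : h = L'.length
        · right
          intro hok
          have := hok 0 (by omega)
          simp only [List.getD_cons_zero] at this
          rw [show h + 1 - 1 - 0 = L'.length by omega, hgetl] at this
          omega
        · rcases ih3 with hcase | hcase
          · left
            simp only [List.length_cons, hlenL] at hcase ⊢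
            omega
          · right
            intro hok
            apply hcase
            intro i hi
            have := hok i hi
            rwa [hgetL _ (by omega)] at this


-- the binary search returns the (unique) feasible-and-maximal value
theorem pvBS_eq (S L : List Int) (B : Int) (g : Nat) (hL : L.Pairwise (· ≤ ·))
    (hg : g ≤ min S.length L.length) (hok : OkP S L B g)
    (hmax : g = min S.length L.length ∨ ¬ OkP S L B (g + 1)) :
    ∀ lo hi, lo ≤ g → g ≤ hi → hi ≤ min S.length L.length → pvBS S L B lo hi = g := by
  intro lo hi
  induction hn : hi - lo using Nat.strong_induction_on generalizing lo hi with
  | _ n ih =>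
    intro hlo hhi hcap
    rw [pvBS]
    by_cases hlt : lo < hi
    · rw [if_pos hlt]
      set mid := (lo + hi + 1) / 2 with hmid
      have hmid1 : lo < mid := by omega
      have hmid2 : mid ≤ hi := by omega
      by_cases hokm : pvOk S L B mid
      · rw [if_pos hokm]
        have hmg : mid ≤ g := by
          by_contra hgt
          have hokm' := (pvOk_iff _ _ _ _).mp hokm
          rcases hmax with h | h
          · omega
          · exact h (okP_mono S L B hL (g + 1) mid (by omega) (by omega) hokm')
        exact ih (hi - mid) (by omega) mid hi rfl hmg hhi hcap
      · rw [if_neg hokm]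
        have hgm : g < mid := by
          by_contra hge
          exact hokm ((pvOk_iff _ _ _ _).mpr
            (okP_mono S L B hL mid g (by omega) (by omega) hok))
        exact ih (mid - 1 - lo) (by omega) lo (mid - 1) rfl hlo (by omega) (by omega)
    · rw [if_neg hlt]; omega


-- ===== VERDICT (by name: the statement is the Claim_ definition above) =====
theorem calcular_pastas_spec : Claim_equal_calcular_pastas := by
  intro t B _
  set S := PySem.List.sorted (t.filter (fun x => 2 * x ≤ B)) (fun x => x) with hSdef
  set L := PySem.List.sorted (t.filter (fun x => B < 2 * x)) (fun x => x) with hLdef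
  have hS : S.Pairwise (· ≤ ·) := PySem.List.sorted_pairwise _ _
  have hL : L.Pairwise (· ≤ ·) := PySem.List.sorted_pairwise _ _
  have hsmall : ∀ x ∈ S, 2 * x ≤ B := by
    intro x hx
    rw [hSdef, PySem.List.mem_sorted, List.mem_filter] at hx
    simpa using hx.2
  have hlarge : ∀ x ∈ L, B < 2 * x := by
    intro x hx
    rw [hLdef, PySem.List.mem_sorted, List.mem_filter] at hx
    simpa using hx.2
  have hsplit : PySem.List.sorted t (fun x => x) = S ++ L := sorted_split t B
  have hlen : t.length = S.length + L.length := by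
    have h1 : (PySem.List.sorted t (fun x => x)).length = t.length :=
      PySem.List.length_sorted ..
    rw [hsplit] at h1
    simpa using h1.symm
  -- the greedy matching size
  obtain ⟨hg, hok, hmax⟩ := gre_spec B L S hS hL
  set g := pvGreedy B S L.reverse with hgdef
  -- A's side
  have hA : calcular_pastas t B
      = 0 + (L.length : Int)
        + ((S.length - 0 - g : Nat) : Int) - (((S.length - 0 - g) / 2 : Nat) : Int) := by
    rw [calcular_pastas, ordenarSelecao_eq_sorted, hsplit]
    have hjarg : ((S ++ L).length : Int) - 1 = (S.length : Int) + (L.length : Int) - 1 := by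
      simp
    rw [hjarg]
    have := phase1 S L B hS hL hsmall hlarge L.length (le_refl _) 0 (by omega) 0
    simpa using this
  -- B's side
  have hm : pvBS S L B 0 (min S.length L.length) = g :=
    pvBS_eq S L B g hL hg hok hmax 0 (min S.length L.length) (by omega) hg (le_refl _)
  have hB : calcular_pastas_alt t B
      = (t.length : Int) - (g : Int) - (((S.length : Int) - (g : Int)) / 2) := by
    rw [calcular_pastas_alt]
    rw [← hSdef, ← hLdef, hm]
  rw [Spec_calcular_pastas, hA, hB]
  have hga : g ≤ S.length := by omega
  have hdiv : ((S.length : Int) - (g : Int)) / 2 = (((S.length - g) / 2 : Nat) : Int) := by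
    rw [show (S.length : Int) - (g : Int) = ((S.length - g : Nat) : Int) by omega]
    exact (Int.natCast_div _ _).symm
  rw [hdiv]
  omega
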